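-- pv_equiv track=rewrite | github.com/DL-art-WEB/https-github.com-open-mmlab-mmsegmentation | my_projects/scripts/plot_scene_results.py | seperate_by_scene_type
-- ===== SOURCE A (Python) =====
-- def seperate_by_scene_type(
--     grouped_by_scene,
--     scene_type_sets = {
--         "viewpoint"     :       ["bottom", "top"],
--         "place"         :       ["floor", "table"]
--     }
-- ):
--     seperated = {}
--     for scene_type, scene_type_names in scene_type_sets.items():
--         seperated[scene_type] = {
--             scene_name : scene_data
--                 for scene_name, scene_data in grouped_by_scene.items()
--                     if scene_name in scene_type_names
--         }
--     return seperated
-- ===== SOURCE B (Python) =====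
-- def seperate_by_scene_type(
--     grouped_by_scene,
--     scene_type_sets = {
--         "viewpoint"     :       ["bottom", "top"],
--         "place"         :       ["floor", "table"]
--     }
-- ):
--     # Build an index: scene_name -> list of scene_types owning it, and
--     # pre-create every scene_type group (so empty groups still appear).
--     owners = {}
--     seperated = {}
--     for scene_type, scene_type_names in scene_type_sets.items():
--         seperated[scene_type] = {}
--         for scene_name in scene_type_names:
--             owners.setdefault(scene_name, []).append(scene_type)
--     # One pass over grouped_by_scene, dispatching each item to its owners.
--     for scene_name, scene_data in grouped_by_scene.items():
--         for scene_type in owners.get(scene_name, []):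
--             seperated[scene_type][scene_name] = scene_data
--     return seperated
-- ===== Notes on version B (the rewrite author's own statement) =====
-- stated objective: faster
-- what changed: B builds a scene_name -> owning scene_types index and pre-creates every group once, then dispatches each grouped_by_scene item in a single pass, instead of A's per-type rescan of grouped_by_scene with a linear 'in names' membership test.
import Mathlib
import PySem

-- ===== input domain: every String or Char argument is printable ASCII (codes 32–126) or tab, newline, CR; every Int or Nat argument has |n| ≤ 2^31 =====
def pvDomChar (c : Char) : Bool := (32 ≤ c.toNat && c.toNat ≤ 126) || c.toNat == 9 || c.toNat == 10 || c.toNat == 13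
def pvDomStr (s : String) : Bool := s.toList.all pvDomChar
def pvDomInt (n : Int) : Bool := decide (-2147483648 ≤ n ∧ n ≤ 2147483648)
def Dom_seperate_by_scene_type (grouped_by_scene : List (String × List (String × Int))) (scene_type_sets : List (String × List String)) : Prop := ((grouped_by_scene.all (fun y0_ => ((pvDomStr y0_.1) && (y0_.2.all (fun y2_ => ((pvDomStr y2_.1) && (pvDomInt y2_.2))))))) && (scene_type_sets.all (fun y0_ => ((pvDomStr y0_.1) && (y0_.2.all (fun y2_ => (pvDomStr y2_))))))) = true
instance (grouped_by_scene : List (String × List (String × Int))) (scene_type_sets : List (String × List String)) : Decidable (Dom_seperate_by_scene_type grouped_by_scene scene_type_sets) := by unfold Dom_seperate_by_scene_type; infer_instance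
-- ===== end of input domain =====

-- B replaces A's per-type rescans of grouped_by_scene with a name→owning-types index
-- built once from scene_type_sets plus a single dispatch pass over grouped_by_scene
-- (objective: faster — the repeated inner scans disappear).

-- Boundary conversion shared by both ports: the Python arguments are dicts
-- (dict of dicts for grouped_by_scene); the association lists are normalised
-- to Python-dict item lists (first occurrence keeps its position, a later
-- duplicate key overwrites the value) before either algorithm runs.
def pyGroupedItems (g : List (String × List (String × Int))) : List (String × List (String × Int)) :=
  (PySem.Dict.ofList (g.map (fun p => (p.1, (PySem.Dict.ofList p.2).items)))).items

def pySceneSetItems (s : List (String × List String)) : List (String × List String) :=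
  (PySem.Dict.ofList s).items

-- ===== PORT A =====
-- for scene_type, scene_type_names in scene_type_sets.items():
--     seperated[scene_type] = {n : d for n, d in grouped_by_scene.items() if n in scene_type_names}
def seperate_by_scene_type (grouped_by_scene : List (String × List (String × Int))) (scene_type_sets : List (String × List String)) : List (String × List (String × List (String × Int))) :=
  let gi := pyGroupedItems grouped_by_scene
  let si := pySceneSetItems scene_type_sets
  (si.foldl
    (fun sep q =>
      sep.insert q.1
        ((gi.foldl
            (fun inner p => if q.2.contains p.1 then inner.insert p.1 p.2 else inner)
            (PySem.Dict.empty : PySem.Dict String (List (String × Int)))).items))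
    (PySem.Dict.empty : PySem.Dict String (List (String × List (String × Int))))).items

-- ===== PORT B =====
-- First loop over scene_type_sets: seperated[t] = {} and owners.setdefault(n, []).append(t);
-- then one pass over grouped_by_scene dispatching each item via owners.get(n, []).
def seperate_by_scene_type_alt (grouped_by_scene : List (String × List (String × Int))) (scene_type_sets : List (String × List String)) : List (String × List (String × List (String × Int))) :=
  let gi := pyGroupedItems grouped_by_scene
  let si := pySceneSetItems scene_type_sets
  let init := si.foldl
    (fun st q =>
      (st.1.insert q.1 (PySem.Dict.empty : PySem.Dict String (List (String × Int))),
       q.2.foldl (fun ow n => ow.insert n (ow.getD n [] ++ [q.1])) st.2))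
    ((PySem.Dict.empty : PySem.Dict String (PySem.Dict String (List (String × Int)))),
     (PySem.Dict.empty : PySem.Dict String (List String)))
  let sep := gi.foldl
    (fun sep p =>
      (init.2.getD p.1 []).foldl
        (fun sep t => sep.insert t ((sep.getD t PySem.Dict.empty).insert p.1 p.2)) sep)
    init.1
  sep.items.map (fun q => (q.1, q.2.items))

-- ===== PRECONDITION & SPEC =====
def Spec_seperate_by_scene_type (grouped_by_scene : List (String × List (String × Int))) (scene_type_sets : List (String × List String)) (out : List (String × List (String × List (String × Int)))) : Prop := out = seperate_by_scene_type_alt grouped_by_scene scene_type_sets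
instance (grouped_by_scene : List (String × List (String × Int))) (scene_type_sets : List (String × List String)) (out : List (String × List (String × List (String × Int)))) : Decidable (Spec_seperate_by_scene_type grouped_by_scene scene_type_sets out) := by unfold Spec_seperate_by_scene_type; infer_instance

-- ===== CLAIM (what is proved, stated in full; the proofs are below) =====
def Claim_equal_seperate_by_scene_type : Prop := ∀ (grouped_by_scene : List (String × List (String × Int))) (scene_type_sets : List (String × List String)), Dom_seperate_by_scene_type grouped_by_scene scene_type_sets → Spec_seperate_by_scene_type grouped_by_scene scene_type_sets (seperate_by_scene_type grouped_by_scene scene_type_sets)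

-- ===== LEMMAS AND PROOFS =====

-- A's inner dict comprehension over distinct fresh keys appends the kept items.
lemma inner_filter (names : List String) :
    ∀ (L : List (String × List (String × Int))) (acc : PySem.Dict String (List (String × Int))),
    (∀ p ∈ L, acc.contains p.1 = false) → (L.map Prod.fst).Nodup →
    (L.foldl (fun inner p => if names.contains p.1 then inner.insert p.1 p.2 else inner) acc).items
      = acc.items ++ L.filter (fun p => names.contains p.1) := by
  intro L
  induction L with
  | nil => intro acc _ _; simp
  | cons p L ih =>
    intro acc hfresh hnd
    simp only [List.foldl_cons, List.filter_cons]
    by_cases hc : names.contains p.1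
    · simp only [hc, if_true]
      rw [ih _ ?_ (by simpa using hnd.of_cons)]
      · rw [PySem.Dict.items_insert_of_not_contains _ _ (hfresh p (by simp))]
        simp
      · intro p' hp'
        rw [PySem.Dict.contains_insert]
        have h1 : (p'.1 == p.1) = false := by
          simp only [List.map_cons, List.nodup_cons] at hnd
          have : p.1 ≠ p'.1 := fun h => hnd.1 (h ▸ List.mem_map_of_mem hp')
          simp [beq_eq_false_iff_ne, Ne, this.symm]
        rw [h1, hfresh p' (by simp [hp'])]; rfl
    · simp only [hc, Bool.false_eq_true, if_false]
      exact ih _ (fun p' hp' => hfresh p' (List.mem_cons_of_mem _ hp')) (by simpa using hnd.of_cons)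

-- Inner setdefault/append loop of B: membership in owners[n] after one names list.
lemma owners_names_mem (t0 : String) (names : List String) :
    ∀ (ow : PySem.Dict String (List String)) (t n : String),
    t ∈ (names.foldl (fun ow n' => ow.insert n' (ow.getD n' [] ++ [t0])) ow).getD n []
      ↔ t ∈ ow.getD n [] ∨ (t = t0 ∧ n ∈ names) := by
  induction names with
  | nil => simp
  | cons n' names ih =>
    intro ow t n
    simp only [List.foldl_cons, ih]
    rw [PySem.Dict.getD_insert]
    by_cases h : n = n' <;> simp [h] <;> tauto

-- Membership in B's owners index: t owns n iff some (t, names) in the sets has n ∈ names.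
lemma owners_mem (S : List (String × List String)) :
    ∀ (ow : PySem.Dict String (List String)) (t n : String),
    t ∈ (S.foldl (fun ow q => q.2.foldl (fun ow n' => ow.insert n' (ow.getD n' [] ++ [q.1])) ow) ow).getD n []
      ↔ t ∈ ow.getD n [] ∨ ∃ q ∈ S, t = q.1 ∧ n ∈ q.2 := by
  induction S with
  | nil => simp
  | cons q S ih =>
    intro ow t n
    simp only [List.foldl_cons, ih, owners_names_mem, List.mem_cons]
    constructor
    · rintro ((h | h) | ⟨q', hq', h⟩)
      · exact Or.inl h
      · exact Or.inr ⟨q, Or.inl rfl, h⟩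
      · exact Or.inr ⟨q', Or.inr hq', h⟩
    · rintro (h | ⟨q', (rfl | hq'), h⟩)
      · exact Or.inl (Or.inl h)
      · exact Or.inl (Or.inr h)
      · exact Or.inr ⟨q', hq', h⟩

-- Distinct keys make the fst projection injective on S.
lemma key_inj {α β : Type} {S : List (α × β)} (hS : (S.map Prod.fst).Nodup)
    {q q' : α × β} (hq : q ∈ S) (hq' : q' ∈ S) (h : q.1 = q'.1) : q = q' :=
  List.inj_on_of_nodup_map hS hq hq' h

-- Dispatching one grouped item to a list of owning types updates exactly those groups.
lemma updAll (S : List (String × List String)) (hS : (S.map Prod.fst).Nodup)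
    (n : String) (d : List (String × Int)) :
    ∀ (l : List String) (F : (String × List String) → PySem.Dict String (List (String × Int)))
      (sep : PySem.Dict String (PySem.Dict String (List (String × Int)))),
    (∀ t ∈ l, ∃ q ∈ S, t = q.1) →
    sep.items = S.map (fun q => (q.1, F q)) →
    (l.foldl (fun sep t => sep.insert t ((sep.getD t PySem.Dict.empty).insert n d)) sep).items
      = S.map (fun q => (q.1, if q.1 ∈ l then (F q).insert n d else F q)) := by
  intro l
  induction l with
  | nil => intro F sep _ hit; simpa using hit
  | cons t0 rest ih =>
    intro F sep hl hit
    obtain ⟨q0, hq0, rfl⟩ := hl t0 (by simp)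
    have hkeys : sep.keys.Nodup := by
      show (sep.items.map Prod.fst).Nodup
      rw [hit, List.map_map]; exact hS
    have hgetD : sep.getD q0.1 PySem.Dict.empty = F q0 := by
      refine PySem.Dict.getD_of_mem_items _ ?_ hkeys _
      rw [hit]; exact List.mem_map_of_mem hq0
    have hcont : sep.contains q0.1 = true := by
      rw [PySem.Dict.contains_iff_mem_keys]
      show q0.1 ∈ sep.items.map Prod.fst
      rw [hit, List.map_map]; exact List.mem_map_of_mem hq0
    rw [List.foldl_cons, hgetD,
      ih (fun q => if q.1 = q0.1 then (F q).insert n d else F q) _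
        (fun t ht => hl t (List.mem_cons_of_mem _ ht)) ?_]
    · refine List.map_congr_left (fun q hq => ?_)
      by_cases h1 : q.1 = q0.1 <;> by_cases h2 : q.1 ∈ rest <;>
        simp [h1, h2, PySem.Dict.insert_insert_self]
    · rw [PySem.Dict.items_insert_of_contains _ _ hcont, hit, List.map_map]
      refine List.map_congr_left (fun q hq => ?_)
      by_cases h1 : q.1 = q0.1
      · have : q = q0 := key_inj hS hq hq0 h1
        subst this; simp
      · simp [h1]

-- Main invariant of B's dispatch pass: each group accumulates the filter of the
-- processed grouped items, i.e. exactly A's per-type comprehension.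
lemma main_fold (S : List (String × List String)) (hS : (S.map Prod.fst).Nodup)
    (owners : PySem.Dict String (List String))
    (how : ∀ t n, t ∈ owners.getD n [] ↔ ∃ q ∈ S, t = q.1 ∧ n ∈ q.2) :
    ∀ (L : List (String × List (String × Int)))
      (F : (String × List String) → PySem.Dict String (List (String × Int)))
      (sep : PySem.Dict String (PySem.Dict String (List (String × Int)))),
    (L.map Prod.fst).Nodup →
    (∀ q ∈ S, ∀ p ∈ L, (F q).contains p.1 = false) →
    sep.items = S.map (fun q => (q.1, F q)) →
    (L.foldl
      (fun sep p => (owners.getD p.1 []).foldl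
        (fun sep t => sep.insert t ((sep.getD t PySem.Dict.empty).insert p.1 p.2)) sep) sep).items
      = S.map (fun q => (q.1, PySem.Dict.mk ((F q).items ++ L.filter (fun p => q.2.contains p.1)))) := by
  intro L
  induction L with
  | nil =>
    intro F sep _ _ hit
    rw [List.foldl_nil, hit]
    simp
  | cons p L ih =>
    intro F sep hnd hfresh hit
    rw [List.foldl_cons,
      ih (fun q => if q.2.contains p.1 then (F q).insert p.1 p.2 else F q) _
        (by simpa using hnd.of_cons) ?_ ?_]
    · refine List.map_congr_left (fun q hq => ?_)
      by_cases hc : q.2.contains p.1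
      · rw [List.filter_cons]
        simp only [hc, if_true]
        rw [PySem.Dict.items_insert_of_not_contains _ _ (hfresh q hq p (by simp))]
        simp
      · have hm : p.1 ∉ q.2 := by simpa using hc
        rw [List.filter_cons]
        simp [hm]
    · intro q hq p' hp'
      by_cases hc : q.2.contains p.1
      · simp only [hc, if_true]
        rw [PySem.Dict.contains_insert]
        have h1 : (p'.1 == p.1) = false := by
          simp only [List.map_cons, List.nodup_cons] at hnd
          have : p.1 ≠ p'.1 := fun h => hnd.1 (h ▸ List.mem_map_of_mem hp')
          simp [beq_eq_false_iff_ne, Ne, this.symm]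
        rw [h1, hfresh q hq p' (by simp [hp'])]; rfl
      · simp only [hc, Bool.false_eq_true, if_false]
        exact hfresh q hq p' (by simp [hp'])
    · rw [updAll S hS p.1 p.2 _ F sep ?_ hit]
      · refine List.map_congr_left (fun q hq => ?_)
        have hiff : q.1 ∈ owners.getD p.1 [] ↔ p.1 ∈ q.2 := by
          rw [how]
          constructor
          · rintro ⟨q', hq', h1, hn⟩
            have : q = q' := key_inj hS hq hq' h1
            subst this
            exact hn
          · intro h
            exact ⟨q, hq, rfl, h⟩
        by_cases hm : p.1 ∈ q.2
        · have hc : q.2.contains p.1 = true := by simpa using hm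
          simp only [if_pos (hiff.2 hm), hc, if_true]
        · have hc : q.2.contains p.1 = false := by simpa using hm
          simp only [if_neg (fun h => hm (hiff.1 h)), hc, Bool.false_eq_true, if_false]
      · intro t ht
        obtain ⟨q, hq, h1, _⟩ := (how t p.1).1 ht
        exact ⟨q, hq, h1⟩

-- ===== VERDICT (by name: the statement is the Claim_ definition above) =====
theorem seperate_by_scene_type_spec : Claim_equal_seperate_by_scene_type := by
  intro g s _
  unfold Spec_seperate_by_scene_type seperate_by_scene_type seperate_by_scene_type_alt
  simp only []
  set gi := pyGroupedItems g with hgi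
  set si := pySceneSetItems s with hsi
  have hSnod : (si.map Prod.fst).Nodup := by
    rw [hsi]; exact PySem.Dict.nodup_keys_ofList s
  have hGnod : (gi.map Prod.fst).Nodup := by
    rw [hgi]; exact PySem.Dict.nodup_keys_ofList _
  -- A's value
  rw [PySem.Dict.items_foldl_insert_fresh si (fun q => q.1)
      (fun q => (gi.foldl (fun inner p => if q.2.contains p.1 then inner.insert p.1 p.2 else inner)
        (PySem.Dict.empty : PySem.Dict String (List (String × Int)))).items)
      PySem.Dict.empty (fun a _ => PySem.Dict.contains_empty _) hSnod]
  -- B's init pair splits into the two folds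
  have hpair : (si.foldl
      (fun st q =>
        (st.1.insert q.1 (PySem.Dict.empty : PySem.Dict String (List (String × Int))),
         q.2.foldl (fun ow n => ow.insert n (ow.getD n [] ++ [q.1])) st.2))
      ((PySem.Dict.empty : PySem.Dict String (PySem.Dict String (List (String × Int)))),
       (PySem.Dict.empty : PySem.Dict String (List String))))
      = (si.foldl (fun st q => st.insert q.1 PySem.Dict.empty) PySem.Dict.empty,
         si.foldl (fun ow q => q.2.foldl (fun ow n => ow.insert n (ow.getD n [] ++ [q.1])) ow) PySem.Dict.empty) :=
    PySem.List.foldl_prod_mk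
      (fun st (q : String × List String) => st.insert q.1 PySem.Dict.empty)
      (fun ow (q : String × List String) => q.2.foldl (fun ow n => ow.insert n (ow.getD n [] ++ [q.1])) ow)
      si PySem.Dict.empty PySem.Dict.empty
  rw [hpair]
  rw [main_fold si hSnod _
      (fun t n => by
        rw [owners_mem]
        simp [PySem.Dict.getD_empty])
      gi (fun _ => PySem.Dict.empty) _ hGnod
      (fun q _ p _ => PySem.Dict.contains_empty _)
      (PySem.Dict.items_foldl_insert_fresh si (fun q => q.1) (fun _ => PySem.Dict.empty)
        PySem.Dict.empty (fun a _ => PySem.Dict.contains_empty _) hSnod)]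
  rw [List.map_map]
  refine List.map_congr_left (fun q hq => ?_)
  rw [inner_filter q.2 gi PySem.Dict.empty (fun p _ => PySem.Dict.contains_empty _) hGnod]
  simp
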